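-- pv_equiv track=rewrite | github.com/mohamedsemah/a11y-evaluator | llm_analyzer.py | _determine_interaction_method
-- ===== SOURCE A (Python) =====
-- from typing import List, Dict, Any
--
-- def _determine_interaction_method(issue: Dict, filename: str) -> str:
--     """Determine primary interaction method based on issue and file context."""
--     issue_type = issue.get("type", "")
--     filename_lower = filename.lower()
--
--     # Voice-related issues
--     if any(word in issue_type for word in ["voice", "speech", "audio"]):
--         return "voice"
--
--     # Touch-related issues
--     if any(word in issue_type for word in ["touch", "gesture", "tap"]):
--         return "touch"
--
--     # Physical control issues
--     if any(word in issue_type for word in ["physical", "button", "steering"]):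
--         return "physical_button"
--
--     # File-based determination
--     if any(word in filename_lower for word in ["voice", "speech", "audio"]):
--         return "voice"
--     elif any(word in filename_lower for word in ["touch", "gesture"]):
--         return "touch"
--     elif any(word in filename_lower for word in ["button", "physical", "steering"]):
--         return "steering_wheel"
--     else:
--         return "mixed"
-- ===== SOURCE B (Python) =====
-- def _determine_interaction_method(issue, filename):
--     """Determine primary interaction method based on issue and file context."""
--     issue_type = issue.get("type", "")
--     filename_lower = filename.lower()
--     # Flat (keyword, priority) table; priorities 0-2 search issue_type, 3-5 filename.
--     table = [("voice", 0), ("speech", 0), ("audio", 0),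
--              ("touch", 1), ("gesture", 1), ("tap", 1),
--              ("physical", 2), ("button", 2), ("steering", 2),
--              ("voice", 3), ("speech", 3), ("audio", 3),
--              ("touch", 4), ("gesture", 4),
--              ("button", 5), ("physical", 5), ("steering", 5)]
--     labels = ["voice", "touch", "physical_button", "voice", "touch",
--               "steering_wheel", "mixed"]
--     best = 6
--     for kw, p in table:
--         if p < best and kw in (issue_type if p < 3 else filename_lower):
--             best = p
--     return labels[best]
-- ===== Notes on version B (the rewrite author's own statement) =====
-- stated objective: alternative
-- what changed: Replaces the six early-return branch checks by a single pass over a flat (keyword, priority) table maintaining the minimum matched priority in an accumulator, then indexing a label array; no early return, the minimum priority reproduces the branch order.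
import Mathlib
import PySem

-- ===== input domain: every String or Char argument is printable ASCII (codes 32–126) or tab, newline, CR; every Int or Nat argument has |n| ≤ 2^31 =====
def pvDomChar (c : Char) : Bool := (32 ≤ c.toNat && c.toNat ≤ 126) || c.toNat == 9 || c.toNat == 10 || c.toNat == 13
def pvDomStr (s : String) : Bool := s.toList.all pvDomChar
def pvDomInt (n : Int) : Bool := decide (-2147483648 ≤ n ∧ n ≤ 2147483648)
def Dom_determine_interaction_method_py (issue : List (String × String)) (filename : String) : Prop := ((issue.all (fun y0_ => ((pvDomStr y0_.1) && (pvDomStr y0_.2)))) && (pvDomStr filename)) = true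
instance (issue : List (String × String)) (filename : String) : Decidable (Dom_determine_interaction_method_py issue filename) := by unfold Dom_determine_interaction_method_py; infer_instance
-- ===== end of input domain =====

-- ===== PORT A =====
def determine_interaction_method_py (issue : List (String × String)) (filename : String) : String :=
  let issue_type := (PySem.Dict.mk issue).getD "type" ""
  let filename_lower := PySem.Str.lower filename
  if (["voice", "speech", "audio"].any (fun word => PySem.Str.isIn word issue_type)) then "voice"
  else if (["touch", "gesture", "tap"].any (fun word => PySem.Str.isIn word issue_type)) then "touch"
  else if (["physical", "button", "steering"].any (fun word => PySem.Str.isIn word issue_type)) then "physical_button"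
  else if (["voice", "speech", "audio"].any (fun word => PySem.Str.isIn word filename_lower)) then "voice"
  else if (["touch", "gesture"].any (fun word => PySem.Str.isIn word filename_lower)) then "touch"
  else if (["button", "physical", "steering"].any (fun word => PySem.Str.isIn word filename_lower)) then "steering_wheel"
  else "mixed"

-- ===== PORT B =====
-- B scans one flat (keyword, priority) table keeping the minimum matched priority
-- in an accumulator, then indexes a label array (objective: alternative decomposition).
def pvStep (it fl : String) (best : Nat) (kp : String × Nat) : Nat :=
  if kp.2 < best ∧ PySem.Str.isIn kp.1 (if kp.2 < 3 then it else fl) then kp.2 else best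

def determine_interaction_method_py_alt (issue : List (String × String)) (filename : String) : String :=
  let issue_type := (PySem.Dict.mk issue).getD "type" ""
  let filename_lower := PySem.Str.lower filename
  let table : List (String × Nat) :=
    [("voice", 0), ("speech", 0), ("audio", 0),
     ("touch", 1), ("gesture", 1), ("tap", 1),
     ("physical", 2), ("button", 2), ("steering", 2),
     ("voice", 3), ("speech", 3), ("audio", 3),
     ("touch", 4), ("gesture", 4),
     ("button", 5), ("physical", 5), ("steering", 5)]
  let labels := ["voice", "touch", "physical_button", "voice", "touch", "steering_wheel", "mixed"]
  let best := table.foldl (pvStep issue_type filename_lower) 6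
  -- labels[best]: best ≤ 6 always, so the index is always in range
  labels.getD best "mixed"

-- ===== PRECONDITION & SPEC =====
def Spec_determine_interaction_method_py (issue : List (String × String)) (filename : String) (out : String) : Prop := out = determine_interaction_method_py_alt issue filename
instance (issue : List (String × String)) (filename : String) (out : String) : Decidable (Spec_determine_interaction_method_py issue filename out) := by unfold Spec_determine_interaction_method_py; infer_instance

-- ===== CLAIM =====
def Claim_equal_determine_interaction_method_py : Prop := ∀ (issue : List (String × String)) (filename : String), Dom_determine_interaction_method_py issue filename → Spec_determine_interaction_method_py issue filename (determine_interaction_method_py issue filename)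

-- ===== LEMMAS AND PROOFS =====
-- The fold over one same-priority group of keywords computes: priority p if any
-- keyword matches and p improves the accumulator, else the accumulator.
theorem pvStep_group (it fl : String) (p : Nat) (kws : List String) (b : Nat) :
    List.foldl (pvStep it fl) b (kws.map (fun k => (k, p))) =
      if p < b ∧ kws.any (fun k => PySem.Str.isIn k (if p < 3 then it else fl)) then p else b := by
  induction kws generalizing b with
  | nil => simp
  | cons k ks ih =>
    simp only [List.map, List.foldl, List.any_cons, pvStep, ih, Bool.or_eq_true]
    by_cases hpb : p < b
    · by_cases h1 : PySem.Str.isIn k (if p < 3 then it else fl) = true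
      · have hin : (if p < b ∧ PySem.Str.isIn k (if p < 3 then it else fl) = true then p else b) = p :=
          if_pos ⟨hpb, h1⟩
        rw [hin, if_neg (fun hc => Nat.lt_irrefl p hc.1), if_pos ⟨hpb, Or.inl h1⟩]
      · have hin : (if p < b ∧ PySem.Str.isIn k (if p < 3 then it else fl) = true then p else b) = b :=
          if_neg (fun hc => h1 hc.2)
        rw [hin]
        simp only [h1, Bool.false_eq_true, false_or]
    · have hin : (if p < b ∧ PySem.Str.isIn k (if p < 3 then it else fl) = true then p else b) = b :=
        if_neg (fun hc => hpb hc.1)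
      rw [hin, if_neg (fun hc => hpb hc.1), if_neg (fun hc => hpb hc.1)]

theorem determine_interaction_method_eq (issue : List (String × String)) (filename : String) :
    determine_interaction_method_py issue filename = determine_interaction_method_py_alt issue filename := by
  unfold determine_interaction_method_py determine_interaction_method_py_alt
  set t := (PySem.Dict.mk issue).getD "type" "" with ht
  set f := PySem.Str.lower filename with hf
  have htab :
      ([("voice", 0), ("speech", 0), ("audio", 0),
        ("touch", 1), ("gesture", 1), ("tap", 1),
        ("physical", 2), ("button", 2), ("steering", 2),
        ("voice", 3), ("speech", 3), ("audio", 3),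
        ("touch", 4), ("gesture", 4),
        ("button", 5), ("physical", 5), ("steering", 5)] : List (String × Nat)) =
      (["voice", "speech", "audio"].map (fun k => (k, 0))) ++
      (["touch", "gesture", "tap"].map (fun k => (k, 1))) ++
      (["physical", "button", "steering"].map (fun k => (k, 2))) ++
      (["voice", "speech", "audio"].map (fun k => (k, 3))) ++
      (["touch", "gesture"].map (fun k => (k, 4))) ++
      (["button", "physical", "steering"].map (fun k => (k, 5))) := rfl
  simp only [htab, List.foldl_append, pvStep_group,
    show ((0:Nat) < 3) = True by simp, show ((1:Nat) < 3) = True by simp,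
    show ((2:Nat) < 3) = True by simp, show ((3:Nat) < 3) = False by simp,
    show ((4:Nat) < 3) = False by simp, show ((5:Nat) < 3) = False by simp,
    if_true, if_false]
  generalize (["voice", "speech", "audio"].any (fun w => PySem.Str.isIn w t)) = b1
  generalize (["touch", "gesture", "tap"].any (fun w => PySem.Str.isIn w t)) = b2
  generalize (["physical", "button", "steering"].any (fun w => PySem.Str.isIn w t)) = b3
  generalize (["voice", "speech", "audio"].any (fun w => PySem.Str.isIn w f)) = b4
  generalize (["touch", "gesture"].any (fun w => PySem.Str.isIn w f)) = b5
  generalize (["button", "physical", "steering"].any (fun w => PySem.Str.isIn w f)) = b6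
  cases b1 <;> cases b2 <;> cases b3 <;> cases b4 <;> cases b5 <;> cases b6 <;> rfl

-- ===== VERDICT =====
theorem determine_interaction_method_py_spec : Claim_equal_determine_interaction_method_py := by
  intro issue filename _
  unfold Spec_determine_interaction_method_py
  exact determine_interaction_method_eq issue filename
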